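-- pv_equiv track=rewrite | github.com/catlee/adventofcode | 2019/python/22/22.py | increment_deal
-- ===== SOURCE A (Python) =====
-- def increment_deal(cards, n):
--     num_spaces = len(cards)
--     spaces = []
--     for i in range(num_spaces):
--         spaces.append([])
--
--     for i, c in enumerate(cards):
--         i = (i * n) % num_spaces
--         spaces[i].append(c)
--
--     rv = []
--     for s in spaces:
--         rv.extend(s)
--
--     return rv
-- ===== SOURCE B (Python) =====
-- def increment_deal(cards, n):
--     num_spaces = len(cards)
--     # sort the indices by destination slot, breaking ties (colliding slots)
--     # by original index via the combined key; then read the cards off in that order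
--     order = sorted(range(num_spaces), key=lambda i: (i * n) % num_spaces * num_spaces + i)
--     return [cards[i] for i in order]
-- ===== Notes on version B (the rewrite author's own statement) =====
-- stated objective: simpler
-- what changed: Replaces A's mutable bucket table (append each card into spaces[(i*n)%m], then flatten the buckets) by a single sort of the indices keyed by destination slot with the original index as tie-break inside the key, then reads the cards off in that order.
import Mathlib
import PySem

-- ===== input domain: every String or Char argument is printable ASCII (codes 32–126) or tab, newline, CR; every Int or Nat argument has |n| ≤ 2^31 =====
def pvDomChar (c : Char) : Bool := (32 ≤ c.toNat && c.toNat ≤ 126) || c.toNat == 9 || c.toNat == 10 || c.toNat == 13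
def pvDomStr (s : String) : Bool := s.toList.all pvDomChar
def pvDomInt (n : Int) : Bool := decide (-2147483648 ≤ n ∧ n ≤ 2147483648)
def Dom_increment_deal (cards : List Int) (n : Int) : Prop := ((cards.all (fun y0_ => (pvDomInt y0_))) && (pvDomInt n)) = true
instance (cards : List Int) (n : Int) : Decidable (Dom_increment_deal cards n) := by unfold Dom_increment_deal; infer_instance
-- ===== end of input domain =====

-- B replaces A's bucket table (append into spaces[(i*n)%m], then flatten) by one sort of
-- the indices keyed by destination slot with ties broken by original index inside the key,
-- then reads the cards off in that order: simpler (no mutable bucket table).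

-- ===== PORT A =====
-- spaces[i].append(c): the index i = (i*n) % num_spaces is provably in range
-- (0 ≤ i < num_spaces), so the list mutation is ported exactly with set/getD at i.toNat.
def increment_deal (cards : List Int) (n : Int) : List Int :=
  let num_spaces : Int := PySem.List.len cards
  let spaces : List (List Int) :=
    (PySem.List.pyRange 0 num_spaces).foldl (fun acc _ => acc ++ [([] : List Int)]) []
  let spaces :=
    (PySem.List.enumerate cards).foldl
      (fun sp ic =>
        let i := PySem.Int.mod (ic.1 * n) num_spaces
        sp.set i.toNat ((sp.getD i.toNat []) ++ [ic.2]))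
      spaces
  spaces.foldl (fun rv s => rv ++ s) []

-- ===== PORT B =====
-- cards[i] in the comprehension: i comes from range(num_spaces), provably in range,
-- ported exactly as pyGetD with default 0.
def increment_deal_alt (cards : List Int) (n : Int) : List Int :=
  let num_spaces : Int := PySem.List.len cards
  let order := PySem.List.sorted (PySem.List.pyRange 0 num_spaces)
      (fun i => PySem.Int.mod (i * n) num_spaces * num_spaces + i)
  order.map (fun i => PySem.List.pyGetD cards i 0)

-- ===== PRECONDITION & SPEC =====
def Spec_increment_deal (cards : List Int) (n : Int) (out : List Int) : Prop := out = increment_deal_alt cards n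
instance (cards : List Int) (n : Int) (out : List Int) : Decidable (Spec_increment_deal cards n out) := by unfold Spec_increment_deal; infer_instance

-- ===== CLAIM (what is proved, stated in full; the proofs are below) =====
def Claim_equal_increment_deal : Prop := ∀ (cards : List Int) (n : Int), Dom_increment_deal cards n → Spec_increment_deal cards n (increment_deal cards n)

-- ===== LEMMAS AND PROOFS =====

-- the common canonical value: for each destination slot j, the cards whose index k maps
-- to j (in index order), concatenated over j = 0 .. len-1
def pvCanon (cards : List Int) (n : Int) : List Int :=
  ((List.range cards.length).map (fun j =>
    ((List.range cards.length).filter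
      (fun (k : Nat) => (PySem.Int.mod ((k : Int) * n) (cards.length : Int)).toNat = j)).map
      (fun k => cards.getD k 0))).flatten

-- A's bucket-filling loop, elementwise
lemma pv_fill (g : Int × Int → Nat) :
    ∀ (l : List (Int × Int)) (sp : List (List Int)), (∀ p ∈ l, g p < sp.length) →
      l.foldl (fun sp p => sp.set (g p) ((sp.getD (g p) []) ++ [p.2])) sp
        = (List.range sp.length).map
            (fun j => sp.getD j [] ++ (l.filter (fun p => g p = j)).map Prod.snd) := by
  intro l
  induction l with
  | nil =>
      intro sp _
      simp only [List.foldl_nil, List.filter_nil, List.map_nil, List.append_nil]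
      apply List.ext_getElem (by simp)
      intro j h1 h2
      rw [List.getElem_map, List.getElem_range, List.getD_eq_getElem _ _ h1]
  | cons p rest ih =>
      intro sp h
      have hp : g p < sp.length := h p (by simp)
      have hlen : (sp.set (g p) ((sp.getD (g p) []) ++ [p.2])).length = sp.length := by simp
      rw [List.foldl_cons, ih _ (by intro q hq; rw [hlen]; exact h q (by simp [hq]))]
      rw [hlen]
      apply List.map_congr_left
      intro j hj
      have hj' : j < sp.length := List.mem_range.mp hj
      by_cases hgj : g p = j
      · subst hgj
        rw [List.getD_eq_getElem _ _ (by simpa using hp), List.getElem_set_self]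
        simp
      · rw [List.getD_eq_getElem _ _ (by simpa using hj'),
            List.getElem_set_ne (by simpa using hgj),
            ← List.getD_eq_getElem sp [] hj']
        simp [hgj]

lemma pv_A_eq_canon (cards : List Int) (n : Int) :
    increment_deal cards n = pvCanon cards n := by
  unfold increment_deal pvCanon
  simp only [PySem.List.len]
  set m := cards.length with hm
  set M : Int := (m : Int) with hM
  have hinit : (PySem.List.pyRange 0 M).foldl (fun acc _ => acc ++ [([] : List Int)]) []
      = List.replicate m ([] : List Int) := by
    rw [PySem.List.foldl_append_singleton_eq_map]
    rw [hM, PySem.List.pyRange_zero_natCast]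
    simp [List.eq_replicate_iff]
  rw [hinit]
  have hfill := pv_fill (fun p => (PySem.Int.mod (p.1 * n) M).toNat)
    (PySem.List.enumerate cards) (List.replicate m ([] : List Int))
    (by
      intro p hp
      rcases (PySem.List.mem_enumerate_iff cards 0 p).mp hp with ⟨k, hk, rfl⟩
      have hM0 : 0 < M := by rw [hM]; exact_mod_cast (by omega : 0 < m)
      have h1 := PySem.Int.mod_lt ((0 + (k : Int)) * n) hM0
      have h0 := PySem.Int.mod_nonneg ((0 + (k : Int)) * n) hM0
      simp only [List.length_replicate]
      omega)
  simp only [List.length_replicate] at hfill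
  rw [hfill, PySem.List.foldl_append_eq_flatten, List.nil_append]
  congr 1
  apply List.map_congr_left
  intro j hj
  have hjm : j < m := List.mem_range.mp hj
  rw [List.getD_eq_getElem _ _ (by simpa using hjm)]
  simp only [List.getElem_replicate, List.nil_append]
  rw [PySem.List.enumerate_eq_map_pyRange cards 0, List.filter_map, List.map_map]
  simp only [PySem.List.len, ← hm, ← hM]
  rw [hM, PySem.List.pyRange_zero_natCast, List.filter_map, List.map_map]
  congr 1
  funext k
  simp [Function.comp, PySem.List.pyGetD_natCast]

-- pyRange 0 m is strictly increasing
lemma pv_pyRange_pairwise (m : Nat) :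
    (PySem.List.pyRange 0 (m : Int)).Pairwise (· < ·) := by
  rw [PySem.List.pyRange_zero_natCast]
  exact (List.pairwise_lt_range).map _ (by intro a b h; exact_mod_cast h)

lemma pv_B_eq_canon (cards : List Int) (n : Int) :
    increment_deal_alt cards n = pvCanon cards n := by
  unfold increment_deal_alt pvCanon
  simp only [PySem.List.len]
  set m := cards.length with hm
  set M : Int := (m : Int) with hM
  set ckey : Int → Int := fun i => PySem.Int.mod (i * n) M * M + i with hck
  set ys : List Int := ((List.range m).map (fun j =>
      (PySem.List.pyRange 0 M).filter
        (fun i => (PySem.Int.mod (i * n) M).toNat = j))).flatten with hys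
  have hMx : ∀ x : Int, x ∈ PySem.List.pyRange 0 M → 0 ≤ x ∧ x < M := by
    intro x hx; exact PySem.List.mem_pyRange_one.mp hx
  -- groups are pairwise strictly increasing under the combined key
  have hpair : ys.Pairwise (fun a b => ckey a < ckey b) := by
    rw [hys, List.pairwise_flatten]
    constructor
    · intro l hl
      rcases List.mem_map.mp hl with ⟨j, _, rfl⟩
      refine ((pv_pyRange_pairwise m).filter _).imp_of_mem ?_
      intro a b ha hb hab
      have ha' := List.mem_filter.mp ha
      have hb' := List.mem_filter.mp hb
      have hMa := hMx a ha'.1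
      have hM0 : 0 < M := by omega
      have hja : PySem.Int.mod (a * n) M = (j : Int) := by
        have := PySem.Int.mod_nonneg (a * n) hM0
        have := of_decide_eq_true ha'.2
        omega
      have hjb : PySem.Int.mod (b * n) M = (j : Int) := by
        have := PySem.Int.mod_nonneg (b * n) hM0
        have := of_decide_eq_true hb'.2
        omega
      rw [hck]
      simp only [hja, hjb]
      linarith [hab]
    · rw [List.pairwise_map]
      refine (List.pairwise_lt_range (n := m)).imp_of_mem ?_
      intro j₁ j₂ _ _ hlt x hx y hy
      have hx' := List.mem_filter.mp hx
      have hy' := List.mem_filter.mp hy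
      have hxr := hMx x hx'.1
      have hyr := hMx y hy'.1
      have hM0 : 0 < M := by omega
      have hjx : PySem.Int.mod (x * n) M = (j₁ : Int) := by
        have := PySem.Int.mod_nonneg (x * n) hM0
        have := of_decide_eq_true hx'.2
        omega
      have hjy : PySem.Int.mod (y * n) M = (j₂ : Int) := by
        have := PySem.Int.mod_nonneg (y * n) hM0
        have := of_decide_eq_true hy'.2
        omega
      rw [hck]
      simp only [hjx, hjy]
      have h1 : (j₁ : Int) + 1 ≤ (j₂ : Int) := by exact_mod_cast hlt
      have h2 : ((j₁ : Int) + 1) * M ≤ (j₂ : Int) * M :=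
        mul_le_mul_of_nonneg_right h1 (le_of_lt hM0)
      nlinarith [hxr.1, hxr.2, hyr.1]
  -- the stable sort is exactly the concatenation of the slot groups
  have hsorted : PySem.List.sorted (PySem.List.pyRange 0 M) ckey = ys := by
    apply PySem.List.sorted_eq_of_perm_of_pairwise_lt
    · have h1 : ys.Nodup := by
        refine List.Pairwise.imp ?_ hpair
        intro a b h heq
        rw [heq] at h
        exact lt_irrefl _ h
      have h2 : (PySem.List.pyRange 0 M).Nodup :=
        (pv_pyRange_pairwise m).imp (fun h => ne_of_lt h)
      rw [List.perm_ext_iff_of_nodup h1 h2]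
      intro x
      constructor
      · intro hx
        rw [hys] at hx
        rcases List.mem_flatten.mp hx with ⟨l, hl, hxl⟩
        rcases List.mem_map.mp hl with ⟨j, _, rfl⟩
        exact (List.mem_filter.mp hxl).1
      · intro hx
        have hxr := hMx x hx
        have hM0 : 0 < M := by omega
        rw [hys]
        apply List.mem_flatten.mpr
        refine ⟨(PySem.List.pyRange 0 M).filter
          (fun i => (PySem.Int.mod (i * n) M).toNat
            = (PySem.Int.mod (x * n) M).toNat), ?_, ?_⟩
        · apply List.mem_map_of_mem
          apply List.mem_range.mpr
          have h0 := PySem.Int.mod_nonneg (x * n) hM0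
          have h1 := PySem.Int.mod_lt (x * n) hM0
          omega
        · simp [List.mem_filter, hx]
    · exact hpair
  rw [hsorted, hys, List.map_flatten, List.map_map]
  congr 1
  apply List.map_congr_left
  intro j hj
  simp only [Function.comp]
  rw [hM, PySem.List.pyRange_zero_natCast, List.filter_map, List.map_map]
  congr 1
  funext k
  simp [Function.comp, PySem.List.pyGetD_natCast]

-- ===== VERDICT (by name: the statement is the Claim_ definition above) =====
theorem increment_deal_spec : Claim_equal_increment_deal := by
  intro cards n _
  unfold Spec_increment_deal
  rw [pv_A_eq_canon, pv_B_eq_canon]
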